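-- pv_equiv track=rewrite | github.com/CHIME-Pulsar-Timing/CHIRPP | src/CHIRPP/get_data_locations.py | find_tars
-- ===== SOURCE A (Python) =====
-- def find_tars(data):
--     paths = [x["current_location"] for x in data["observation_details"]]
--
--     datadirs = set()
--     tars = set()
--
--     for path in paths:
--         if path:
--             if path.endswith(".tar"):
--                 tars.add(path)
--             elif path.endswith(".ar"):
--                 datafile = path.split("/")[-1]
--                 n = len(datafile)
--                 loc = path[:-n].rstrip("/")
--                 datadirs.add(loc)
--             else:
--                 loc = path.rstrip("/")
--                 datadirs.add(loc)
--
--     tardirs = set()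
--     for tar in sorted(tars):
--         tarname = tar.split("/")[-1]
--         n = len(tarname)
--         tardir = tar[:-n].rstrip("/")
--         tardirs.add(tardir)
--
--     return datadirs, sorted(tars), tardirs
-- ===== SOURCE B (Python) =====
-- def find_tars(data):
--     paths = [x["current_location"] for x in data["observation_details"]]
--
--     def dirof(p):
--         # directory part: scan from the right past the basename, then past slashes
--         r = p[::-1]
--         n = len(r)
--         k = 0
--         while k < n and r[k] != "/":
--             k += 1
--         while k < n and r[k] == "/":
--             k += 1
--         return r[k:][::-1]
--
--     tars = sorted({p for p in paths if p and p.endswith(".tar")})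
--     datadirs = {dirof(p) if p.endswith(".ar") else p.rstrip("/")
--                 for p in paths if p and not p.endswith(".tar")}
--     tardirs = {dirof(t) for t in tars}
--     return datadirs, tars, tardirs
-- ===== Notes on version B (the rewrite author's own statement) =====
-- stated objective: alternative
-- what changed: A's single branching loop with two set accumulators plus a second loop over sorted(tars) is replaced by three independent comprehension/filter passes, and the split/len/negative-slice/rstrip directory extraction is replaced by a right-to-left scan (skip basename run, then slash run) helper dirof.
import Mathlib
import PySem

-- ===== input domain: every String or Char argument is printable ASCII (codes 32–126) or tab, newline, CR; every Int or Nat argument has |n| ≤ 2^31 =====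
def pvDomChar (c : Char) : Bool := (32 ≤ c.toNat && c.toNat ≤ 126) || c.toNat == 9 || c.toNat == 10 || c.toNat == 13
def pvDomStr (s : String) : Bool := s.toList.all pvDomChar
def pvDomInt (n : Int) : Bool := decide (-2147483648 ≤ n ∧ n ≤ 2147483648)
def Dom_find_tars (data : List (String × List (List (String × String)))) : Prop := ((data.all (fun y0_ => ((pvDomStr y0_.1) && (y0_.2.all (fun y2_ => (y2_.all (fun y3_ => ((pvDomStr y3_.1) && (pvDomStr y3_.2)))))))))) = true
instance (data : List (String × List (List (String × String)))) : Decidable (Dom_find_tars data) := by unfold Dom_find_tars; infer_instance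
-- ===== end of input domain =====

-- B replaces A's branching accumulation loop plus second sorted-tars loop by three
-- independent comprehension-style passes and a right-scan `dirof`; objective: alternative.

-- ===== PORT A =====
-- hand port of Python's s.rstrip("/") (PySem has no rstrip-with-chars): drop trailing '/'
-- characters from the right; exact for every string
def pyRstripSlash (s : String) : String :=
  String.ofList ((s.toList.reverse.dropWhile (fun c => c == '/')).reverse)

def find_tars (data : List (String × List (List (String × String)))) : List String × List String × List String :=
  let obs := ((PySem.Dict.mk data).get? "observation_details").getD []
  let paths := obs.map (fun x => ((PySem.Dict.mk x).get? "current_location").getD "")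
  let st := paths.foldl (fun (st : PySem.Set String × PySem.Set String) path =>
      if path == "" then st
      else if PySem.Str.endswith path ".tar" then (st.1, PySem.Set.add st.2 path)
      else if PySem.Str.endswith path ".ar" then
        let datafile := (PySem.List.pyGet? ((PySem.Str.split? path "/").getD []) (-1)).getD ""
        let n := PySem.Str.len datafile
        let loc := pyRstripSlash (PySem.Str.slice path none (some (-n)))
        (PySem.Set.add st.1 loc, st.2)
      else
        let loc := pyRstripSlash path
        (PySem.Set.add st.1 loc, st.2))
    (PySem.Set.empty, PySem.Set.empty)
  let sortedTars := PySem.List.sorted st.2 (fun x => x) false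
  let tardirs := sortedTars.foldl (fun (td : PySem.Set String) tar =>
      let tarname := (PySem.List.pyGet? ((PySem.Str.split? tar "/").getD []) (-1)).getD ""
      let n := PySem.Str.len tarname
      let tardir := pyRstripSlash (PySem.Str.slice tar none (some (-n)))
      PySem.Set.add td tardir) PySem.Set.empty
  (st.1, sortedTars, tardirs)

-- ===== PORT B =====
-- port of Source B's dirof: reversed string, skip the basename run, then the slash run
def pyDirOf (p : String) : String :=
  let r := p.toList.reverse
  let r1 := r.dropWhile (fun c => !(c == '/'))
  let r2 := r1.dropWhile (fun c => c == '/')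
  String.ofList r2.reverse

def find_tars_alt (data : List (String × List (List (String × String)))) : List String × List String × List String :=
  let obs := ((PySem.Dict.mk data).get? "observation_details").getD []
  let paths := obs.map (fun x => ((PySem.Dict.mk x).get? "current_location").getD "")
  let tars := PySem.List.sorted
      (PySem.Set.ofList (paths.filter (fun p => !(p == "") && PySem.Str.endswith p ".tar")))
      (fun x => x) false
  let datadirs := PySem.Set.ofList
      ((paths.filter (fun p => !(p == "") && !PySem.Str.endswith p ".tar")).map
        (fun p => if PySem.Str.endswith p ".ar" then pyDirOf p else pyRstripSlash p))
  let tardirs := PySem.Set.ofList (tars.map pyDirOf)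
  (datadirs, tars, tardirs)

-- ===== PRECONDITION & SPEC =====
-- Pre_ excludes exactly the inputs where Python A raises KeyError: a missing
-- "observation_details" key, or an observation dict without "current_location".
def Pre_find_tars (data : List (String × List (List (String × String)))) : Prop :=
  ((PySem.Dict.mk data).get? "observation_details").isSome = true ∧
  ∀ x ∈ ((PySem.Dict.mk data).get? "observation_details").getD [],
    ((PySem.Dict.mk x).get? "current_location").isSome = true
instance (data : List (String × List (List (String × String)))) : Decidable (Pre_find_tars data) := by unfold Pre_find_tars; infer_instance

def pvWitness_find_tars : (List (String × List (List (String × String)))) :=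
  [("observation_details", [[("current_location", "a/b.tar")], [("current_location", "d/x.ar")]])]

def Spec_find_tars (data : List (String × List (List (String × String)))) (out : List String × List String × List String) : Prop := out = find_tars_alt data
instance (data : List (String × List (List (String × String)))) (out : List String × List String × List String) : Decidable (Spec_find_tars data out) := by unfold Spec_find_tars; infer_instance

-- ===== CLAIM (what is proved, stated in full; the proofs are below) =====
def Claim_equal_find_tars : Prop := ∀ (data : List (String × List (List (String × String)))), Dom_find_tars data → Pre_find_tars data → Spec_find_tars data (find_tars data)

-- ===== LEMMAS AND PROOFS =====

-- the maximal '/'-free suffix of cs (what Python's cs.split("/")[-1] returns)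
def lastPiece (cs : List Char) : List Char := (cs.reverse.takeWhile (fun c => !(c == '/'))).reverse

theorem takeWhile_len_eq_iff (l : List Char) (p : Char → Bool) :
    (l.takeWhile p).length = l.length ↔ ∀ x ∈ l, p x = true := by
  constructor
  · intro h x hx
    have := (List.takeWhile_prefix (l := l) (p := p)).eq_of_length h
    exact (List.takeWhile_eq_self_iff).1 this x hx
  · intro h
    rw [(List.takeWhile_eq_self_iff).2 h]

theorem lastPiece_cons (c : Char) (rest : List Char) :
    lastPiece (c :: rest) = if '/' ∈ rest then lastPiece rest
      else (if c = '/' then rest else c :: rest) := by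
  simp only [lastPiece, List.reverse_cons, List.takeWhile_append]
  by_cases h : '/' ∈ rest
  · have hcond : ¬ ((rest.reverse.takeWhile (fun c => !(c == '/'))).length = rest.length) := by
      rw [← List.length_reverse (as := rest), takeWhile_len_eq_iff]
      intro hall
      have := hall '/' (by simpa using h)
      simp at this
    simp [hcond, h]
  · have hcond : (rest.reverse.takeWhile (fun c => !(c == '/'))).length = rest.length := by
      rw [← List.length_reverse (as := rest), takeWhile_len_eq_iff]
      intro x hx
      simp only [List.mem_reverse] at hx
      simp only [Bool.not_eq_true']
      exact beq_eq_false_iff_ne.2 (fun hxe => h (hxe ▸ hx))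
    by_cases hc : c = '/'
    · simp [hcond, h, hc]
    · have hb : (c == '/') = false := beq_eq_false_iff_ne.2 hc
      simp [hcond, h, hc, hb]

theorem go_last (fuel : Nat) :
    ∀ (l cur : List Char) (acc : List (List Char)), l.length < fuel →
      (PySem.Chars.splitOn.go ['/'] fuel l cur acc).getLast?
        = some (if '/' ∈ l then lastPiece l else cur.reverse ++ l) := by
  induction fuel with
  | zero => intro l cur acc h; omega
  | succ fuel ih =>
    intro l cur acc h
    match l with
    | [] => simp [PySem.Chars.splitOn.go]
    | c :: rest =>
      rw [PySem.Chars.splitOn.go]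
      by_cases hc : c = '/'
      · subst hc
        have hpre : List.isPrefixOf ['/'] ('/' :: rest) = true := by
          simp [List.isPrefixOf]
        rw [if_pos hpre]
        have := ih rest [] (cur.reverse :: acc) (by simpa using Nat.lt_of_succ_lt_succ h)
        simp only [List.length_singleton, List.drop_one, List.tail_cons] at this ⊢
        rw [this, lastPiece_cons]
        by_cases hm : '/' ∈ rest <;> simp [hm]
      · have hpre : List.isPrefixOf ['/'] (c :: rest) = false := by
          simp [List.isPrefixOf]
          exact fun he => absurd he.symm hc
        rw [if_neg (by simp [hpre])]
        have := ih rest (c :: cur) acc (by simpa using Nat.lt_of_succ_lt_succ h)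
        rw [this, lastPiece_cons]
        by_cases hm : '/' ∈ rest
        · simp [hm]
        · simp [hm, hc, List.append_assoc]
          exact fun he => absurd he.symm hc

theorem splitOn_last (cs : List Char) :
    (PySem.Chars.splitOn cs ['/']).getLast? = some (lastPiece cs) := by
  rw [PySem.Chars.splitOn, go_last (cs.length + 1) cs [] [] (by omega)]
  by_cases hm : '/' ∈ cs
  · simp [hm]
  · simp only [hm, if_false, List.reverse_nil, List.nil_append, Option.some.injEq, lastPiece]
    rw [List.takeWhile_eq_self_iff.2]
    · simp
    · intro x hx
      simp only [List.mem_reverse] at hx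
      simp only [Bool.not_eq_true']
      exact beq_eq_false_iff_ne.2 (fun hxe => hm (hxe ▸ hx))

theorem drop_takeWhile_len (l : List Char) (p : Char → Bool) :
    l.drop (l.takeWhile p).length = l.dropWhile p := by
  induction l with
  | nil => rfl
  | cons a t ih => by_cases h : p a <;> simp [List.takeWhile, List.dropWhile, h, ih]

-- the directory expression A computes (split / len / slice / rstrip) equals B's
-- right-scan dirof whenever the string's last character is not '/'
theorem dirA_eq_pyDirOf (p : String) (c : Char) (rs : List Char)
    (hrev : p.toList.reverse = c :: rs) (hc : (c == '/') = false) :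
    pyRstripSlash (PySem.Str.slice p none
        (some (-(PySem.Str.len ((PySem.List.pyGet?
          ((PySem.Str.split? p "/").getD []) (-1)).getD ""))))) = pyDirOf p := by
  have hsplit : (PySem.Str.split? p "/").getD []
      = (PySem.Chars.splitOn p.toList ['/']).map String.ofList := by
    simp [PySem.Str.split?, PySem.Chars.split?]
  rw [hsplit, PySem.List.pyGet?_neg_one, List.getLast?_map, splitOn_last]
  have hlen : PySem.Str.len (String.ofList (lastPiece p.toList))
      = ((lastPiece p.toList).length : Int) := by
    simp [PySem.Str.len]
  rw [Option.map_some, Option.getD_some, hlen]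
  have hk : 0 < (lastPiece p.toList).length := by
    simp only [lastPiece, hrev, List.takeWhile_cons, hc]
    simp
  -- evaluate the slice: p[:-k] = take (len - k)
  have hslice : (PySem.Str.slice p none (some (-(((lastPiece p.toList).length : Nat) : Int)))).toList
      = p.toList.take (p.toList.length - (lastPiece p.toList).length) := by
    simp only [PySem.Str.toList_slice, PySem.Chars.slice_eq_listSlice]
    exact PySem.List.slice_to_neg_natCast p.toList _ hk
  simp only [pyRstripSlash, pyDirOf, hslice]
  have htake : p.toList.take (p.toList.length - (lastPiece p.toList).length)
      = (p.toList.reverse.drop (lastPiece p.toList).length).reverse := by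
    rw [List.drop_reverse, List.reverse_reverse]
  rw [htake, List.reverse_reverse]
  have hlp : (lastPiece p.toList).length
      = (p.toList.reverse.takeWhile (fun c => !(c == '/'))).length := by
    simp [lastPiece]
  rw [hlp, drop_takeWhile_len]

-- ends-with ".ar" / ".tar" gives a last character ≠ '/'
theorem endswith_ar_last (p : String) (suf : String) (h : PySem.Str.endswith p suf = true)
    (c : Char) (rs : List Char) (hs : suf.toList.reverse = c :: rs) (hc : (c == '/') = false) :
    ∃ c' rs', p.toList.reverse = c' :: rs' ∧ (c' == '/') = false := by
  have hsfx : suf.toList <:+ p.toList := by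
    have := PySem.Str.endswith_eq p suf
    rw [this] at h
    exact (PySem.Chars.endswith_iff _ _).1 h
  obtain ⟨t, ht⟩ := hsfx
  refine ⟨c, rs ++ t.reverse, ?_, hc⟩
  rw [← ht, List.reverse_append, hs]
  simp

theorem find_tars_spec_aux (paths : List String) :
    (let st := paths.foldl (fun (st : PySem.Set String × PySem.Set String) path =>
        if path == "" then st
        else if PySem.Str.endswith path ".tar" then (st.1, PySem.Set.add st.2 path)
        else if PySem.Str.endswith path ".ar" then
          (PySem.Set.add st.1 (pyRstripSlash (PySem.Str.slice path none
            (some (-(PySem.Str.len ((PySem.List.pyGet?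
              ((PySem.Str.split? path "/").getD []) (-1)).getD "")))))), st.2)
        else (PySem.Set.add st.1 (pyRstripSlash path), st.2))
      (PySem.Set.empty, PySem.Set.empty)
     let sortedTars := PySem.List.sorted st.2 (fun x => x) false
     let tardirs := sortedTars.foldl (fun (td : PySem.Set String) tar =>
        PySem.Set.add td (pyRstripSlash (PySem.Str.slice tar none
          (some (-(PySem.Str.len ((PySem.List.pyGet?
            ((PySem.Str.split? tar "/").getD []) (-1)).getD ""))))))) PySem.Set.empty
     (st.1, sortedTars, tardirs))
    = (PySem.Set.ofList ((paths.filter (fun p => !(p == "") && !PySem.Str.endswith p ".tar")).map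
          (fun p => if PySem.Str.endswith p ".ar" then pyDirOf p else pyRstripSlash p)),
       PySem.List.sorted (PySem.Set.ofList (paths.filter (fun p => !(p == "") && PySem.Str.endswith p ".tar"))) (fun x => x) false,
       PySem.Set.ofList ((PySem.List.sorted (PySem.Set.ofList (paths.filter (fun p => !(p == "") && PySem.Str.endswith p ".tar"))) (fun x => x) false).map pyDirOf)) := by
  simp only []
  -- abbreviations for A's inline directory expression and the branch values
  set dA : String → String := fun p =>
    pyRstripSlash (PySem.Str.slice p none
      (some (-(PySem.Str.len ((PySem.List.pyGet?
        ((PySem.Str.split? p "/").getD []) (-1)).getD "")))))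
  have hdAeq : ∀ p : String, ∀ suf : String, PySem.Str.endswith p suf = true →
      (∃ c rs, suf.toList.reverse = c :: rs ∧ (c == '/') = false) → dA p = pyDirOf p := by
    intro p suf hsuf ⟨c, rs, hs, hc⟩
    obtain ⟨c', rs', hrev, hc'⟩ := endswith_ar_last p suf hsuf c rs hs hc
    exact dirA_eq_pyDirOf p c' rs' hrev hc'
  -- split the two-accumulator loop into two independent folds
  have hstep : (fun (st : PySem.Set String × PySem.Set String) path =>
        if path == "" then st
        else if PySem.Str.endswith path ".tar" then (st.1, PySem.Set.add st.2 path)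
        else if PySem.Str.endswith path ".ar" then (PySem.Set.add st.1 (dA path), st.2)
        else (PySem.Set.add st.1 (pyRstripSlash path), st.2))
      = (fun (st : PySem.Set String × PySem.Set String) p =>
          ((fun (dd : PySem.Set String) p =>
              if (!(p == "") && !PySem.Str.endswith p ".tar") = true
              then PySem.Set.add dd (if PySem.Str.endswith p ".ar" then dA p else pyRstripSlash p)
              else dd) st.1 p,
           (fun (ts : PySem.Set String) p =>
              if (!(p == "") && PySem.Str.endswith p ".tar") = true
              then PySem.Set.add ts p else ts) st.2 p)) := by
    funext st p
    cases h0 : (p == "") <;> cases ht : PySem.Str.endswith p ".tar" <;>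
      cases ha : PySem.Str.endswith p ".ar" <;>
      simp only [h0, ht, ha, Bool.not_true, Bool.not_false,
        Bool.and_false, Bool.and_true, if_true, if_false, Bool.false_eq_true]
  rw [hstep, PySem.List.foldl_prod_mk
    (f := fun (dd : PySem.Set String) p =>
      if (!(p == "") && !PySem.Str.endswith p ".tar") = true
      then PySem.Set.add dd (if PySem.Str.endswith p ".ar" then dA p else pyRstripSlash p)
      else dd)
    (g := fun (ts : PySem.Set String) p =>
      if (!(p == "") && PySem.Str.endswith p ".tar") = true
      then PySem.Set.add ts p else ts)]
  have htars : List.foldl (fun (ts : PySem.Set String) p =>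
        if (!(p == "") && PySem.Str.endswith p ".tar") = true
        then PySem.Set.add ts p else ts) PySem.Set.empty paths
      = PySem.Set.ofList (paths.filter (fun p => !(p == "") && PySem.Str.endswith p ".tar")) := by
    rw [PySem.List.foldl_if_eq_foldl_filter, PySem.Set.ofList_eq_foldl]
    rfl
  have hdd : List.foldl (fun (dd : PySem.Set String) p =>
        if (!(p == "") && !PySem.Str.endswith p ".tar") = true
        then PySem.Set.add dd (if PySem.Str.endswith p ".ar" then dA p else pyRstripSlash p)
        else dd) PySem.Set.empty paths
      = PySem.Set.ofList ((paths.filter (fun p => !(p == "") && !PySem.Str.endswith p ".tar")).map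
          (fun p => if PySem.Str.endswith p ".ar" then pyDirOf p else pyRstripSlash p)) := by
    rw [PySem.List.foldl_if_eq_foldl_filter, PySem.Set.ofList_eq_foldl, List.foldl_map]
    apply PySem.List.foldl_congr_mem
    intro acc x _hx
    by_cases ha : PySem.Str.endswith x ".ar"
    · rw [if_pos ha, if_pos ha, hdAeq x ".ar" ha ⟨'r', ['a', '.'], by decide, by decide⟩]
    · rw [if_neg ha, if_neg ha]
  rw [htars, hdd]
  refine Prod.ext rfl (Prod.ext rfl ?_)
  have htd : ∀ (ts : List String), (∀ t ∈ ts, PySem.Str.endswith t ".tar" = true) →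
      List.foldl (fun (td : PySem.Set String) tar => PySem.Set.add td (dA tar)) PySem.Set.empty ts
        = PySem.Set.ofList (ts.map pyDirOf) := by
    intro ts hts
    rw [PySem.Set.ofList_eq_foldl, List.foldl_map]
    apply PySem.List.foldl_congr_mem
    intro acc t ht
    rw [hdAeq t ".tar" (hts t ht) ⟨'r', ['a', 't', '.'], by decide, by decide⟩]
  apply htd
  intro t ht
  rw [PySem.List.mem_sorted] at ht
  rw [PySem.Set.mem_ofList] at ht
  have hf := List.mem_filter.1 ht
  have := hf.2
  simp only [Bool.and_eq_true] at this
  exact this.2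

-- ===== VERDICT (by name: the statement is the Claim_ definition above) =====
theorem find_tars_spec : Claim_equal_find_tars := by
  intro data _hdom _hpre
  unfold Spec_find_tars find_tars find_tars_alt
  exact find_tars_spec_aux _
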